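-- pv_equiv track=rewrite | github.com/folterj/BioImageOperation-B | src/pipeline/extract_features.py | get_typical_activity
-- ===== SOURCE A (Python) =====
-- def get_typical_activity(activity, central_frame, frames_range):
--     activities = []
--     for frame in range(central_frame - frames_range, central_frame + frames_range):
--         if frame in activity:
--             activity1 = activity[frame]
--             if activity1 != '':
--                 activities.append(activity1)
--     if len(activities) > 0:
--         return sorted(activities)[len(activities) // 2]
--     return ''
-- ===== SOURCE B (Python) =====
-- def get_typical_activity(activity, central_frame, frames_range):
--     lo = central_frame - frames_range
--     hi = central_frame + frames_range
--     vals = [v for f, v in activity.items() if lo <= f < hi and v != '']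
--     if vals:
--         return sorted(vals)[len(vals) // 2]
--     return ''
-- ===== Notes on version B (the rewrite author's own statement) =====
-- stated objective: idiomatic
-- what changed: B inverts the traversal: instead of scanning the frame range and probing the dict for each frame, it iterates the dict's items once, keeping values whose frame lies in the window, then takes the median of the sorted kept values.
import Mathlib
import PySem

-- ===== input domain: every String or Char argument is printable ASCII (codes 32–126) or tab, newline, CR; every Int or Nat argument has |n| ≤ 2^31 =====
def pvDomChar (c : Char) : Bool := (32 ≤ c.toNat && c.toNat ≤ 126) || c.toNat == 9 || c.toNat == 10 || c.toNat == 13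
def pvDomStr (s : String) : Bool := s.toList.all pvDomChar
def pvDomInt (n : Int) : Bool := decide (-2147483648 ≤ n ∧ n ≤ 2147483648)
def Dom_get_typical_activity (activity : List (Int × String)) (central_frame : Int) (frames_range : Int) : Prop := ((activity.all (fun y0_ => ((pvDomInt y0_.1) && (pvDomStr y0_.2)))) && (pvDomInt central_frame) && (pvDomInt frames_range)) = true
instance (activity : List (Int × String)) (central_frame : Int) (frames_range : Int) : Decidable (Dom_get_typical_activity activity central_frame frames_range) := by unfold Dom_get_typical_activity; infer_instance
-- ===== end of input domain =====

-- B iterates the dict's items once keeping values in the frame window, instead of scanning the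
-- frame range and probing the dict per frame (same cost class; more idiomatic).

-- ===== PORT A =====
def get_typical_activity (activity : List (Int × String)) (central_frame : Int) (frames_range : Int) : String :=
  let activities : List String :=
    (PySem.List.pyRange (central_frame - frames_range) (central_frame + frames_range) 1).foldl
      (fun acc frame =>
        match (PySem.Dict.mk activity).get? frame with   -- 'frame in activity' + 'activity[frame]'
        | some activity1 => if activity1 ≠ "" then acc ++ [activity1] else acc
        | none => acc) []
  if activities.length > 0 then
    (PySem.List.sorted activities (fun x => x) false).getD (activities.length / 2) ""
  else ""

-- ===== PORT B =====
def get_typical_activity_alt (activity : List (Int × String)) (central_frame : Int) (frames_range : Int) : String :=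
  let lo := central_frame - frames_range
  let hi := central_frame + frames_range
  let vals : List String :=
    (activity.filter (fun fv => decide (lo ≤ fv.1) && decide (fv.1 < hi) && (fv.2 != ""))).map Prod.snd
  if vals ≠ [] then
    (PySem.List.sorted vals (fun x => x) false).getD (vals.length / 2) ""
  else ""

-- ===== PRECONDITION & SPEC =====
-- Pre_ excludes association lists with duplicate frame keys: such a list does not represent a
-- Python dict (which has unique keys), and first-match lookup vs. whole-list iteration disagree there.
def Pre_get_typical_activity (activity : List (Int × String)) (central_frame : Int) (frames_range : Int) : Prop :=
  (activity.map Prod.fst).Nodup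
instance (activity : List (Int × String)) (central_frame : Int) (frames_range : Int) : Decidable (Pre_get_typical_activity activity central_frame frames_range) := by unfold Pre_get_typical_activity; infer_instance
def pvWitness_get_typical_activity : (List (Int × String)) × Int × Int := ([(0, "a"), (1, "b"), (2, "c")], 1, 2)

def Spec_get_typical_activity (activity : List (Int × String)) (central_frame : Int) (frames_range : Int) (out : String) : Prop := out = get_typical_activity_alt activity central_frame frames_range
instance (activity : List (Int × String)) (central_frame : Int) (frames_range : Int) (out : String) : Decidable (Spec_get_typical_activity activity central_frame frames_range out) := by unfold Spec_get_typical_activity; infer_instance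

-- ===== CLAIM (what is proved, stated in full; the proofs are below) =====
def Claim_equal_get_typical_activity : Prop := ∀ (activity : List (Int × String)) (central_frame : Int) (frames_range : Int), Dom_get_typical_activity activity central_frame frames_range → Pre_get_typical_activity activity central_frame frames_range → Spec_get_typical_activity activity central_frame frames_range (get_typical_activity activity central_frame frames_range)

-- ===== LEMMAS AND PROOFS =====

-- A's per-frame step as a filterMap function
def pvStepA (activity : List (Int × String)) (frame : Int) : Option String :=
  match (PySem.Dict.mk activity).get? frame with
  | some a1 => if a1 ≠ "" then some a1 else none
  | none => none

lemma pv_foldl_shape (d : List (Int × String)) (l : List Int) (init : List String) :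
    l.foldl (fun acc frame =>
        match (PySem.Dict.mk d).get? frame with
        | some activity1 => if activity1 ≠ "" then acc ++ [activity1] else acc
        | none => acc) init
      = init ++ l.filterMap (pvStepA d) := by
  induction l generalizing init with
  | nil => simp
  | cons x xs ih =>
    rw [List.foldl_cons, List.filterMap_cons]
    cases h : (PySem.Dict.mk d).get? x with
    | none =>
      simp only [pvStepA, h]
      exact ih init
    | some a1 =>
      by_cases ha : a1 = ""
      · subst ha
        simp only [pvStepA, h]
        rw [if_neg (by simp), if_neg (by simp)]
        exact ih init
      · simp only [pvStepA, h]
        rw [if_pos ha, if_pos ha, ih (init ++ [a1]), List.append_assoc]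
        rfl
lemma pv_get?_mk_eq_none (rest : List (Int × String)) (k : Int)
    (hk : k ∉ rest.map Prod.fst) : (PySem.Dict.mk rest).get? k = none := by
  induction rest with
  | nil => simp [PySem.Dict.get?]
  | cons p t ih =>
    rw [PySem.Dict.get?_mk_cons]
    simp only [List.map_cons, List.mem_cons] at hk
    have h1 : ¬ k = p.1 := fun h => hk (Or.inl h)
    have h2 : k ∉ t.map Prod.fst := fun h => hk (Or.inr h)
    have hbe : (p.1 == k) = false := beq_eq_false_iff_ne.mpr (fun h => h1 h.symm)
    rw [hbe, if_neg (by simp), ih h2]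

lemma pv_perm_core (activity : List (Int × String)) (lo hi : Int)
    (h : (activity.map Prod.fst).Nodup) :
    ((PySem.List.pyRange lo hi 1).filterMap (pvStepA activity)).Perm
      ((activity.filter (fun fv => decide (lo ≤ fv.1) && decide (fv.1 < hi) && (fv.2 != ""))).map Prod.snd) := by
  induction activity with
  | nil =>
    simp [pvStepA, PySem.Dict.get?]
  | cons kv rest ih =>
    obtain ⟨k, v⟩ := kv
    simp only [List.map_cons, List.nodup_cons] at h
    obtain ⟨hknot, hnd⟩ := h
    have hstep : ∀ f : Int, f ≠ k → pvStepA ((k, v) :: rest) f = pvStepA rest f := by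
      intro f hf
      have hbe : (k == f) = false := beq_eq_false_iff_ne.mpr (fun h => hf h.symm)
      simp only [pvStepA, PySem.Dict.get?_mk_cons, hbe]
      simp
    by_cases hk : k ∈ PySem.List.pyRange lo hi 1
    · -- k occurs exactly once in the range
      obtain ⟨l1, l2, hsplit⟩ := List.append_of_mem hk
      have hnodup : (PySem.List.pyRange lo hi 1).Nodup := PySem.List.nodup_pyRange_one lo hi
      rw [hsplit] at hnodup
      have hk1 : k ∉ l1 := fun hmem => (List.disjoint_of_nodup_append hnodup) hmem (by simp)
      have hk2 : k ∉ l2 := by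
        have := (List.nodup_append.mp hnodup).2.1
        exact (List.nodup_cons.mp this).1
      have hrange := (PySem.List.mem_pyRange_one).mp hk
      rw [hsplit, List.filterMap_append, List.filterMap_cons]
      have hg1 : l1.filterMap (pvStepA ((k, v) :: rest)) = l1.filterMap (pvStepA rest) :=
        List.filterMap_congr (fun f hf => hstep f (fun he => hk1 (he ▸ hf)))
      have hg2 : l2.filterMap (pvStepA ((k, v) :: rest)) = l2.filterMap (pvStepA rest) :=
        List.filterMap_congr (fun f hf => hstep f (fun he => hk2 (he ▸ hf)))
      have hgk : pvStepA ((k, v) :: rest) k = if v ≠ "" then some v else none := by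
        simp [pvStepA, PySem.Dict.get?_mk_cons]
      have hrestk : pvStepA rest k = none := by
        simp [pvStepA, pv_get?_mk_eq_none rest k hknot]
      have hih : ((l1 ++ k :: l2).filterMap (pvStepA rest)).Perm
          ((rest.filter (fun fv => decide (lo ≤ fv.1) && decide (fv.1 < hi) && (fv.2 != ""))).map Prod.snd) := by
        rw [← hsplit]; exact ih hnd
      rw [List.filterMap_append, List.filterMap_cons, hrestk] at hih
      simp only [List.filter_cons]
      have hcond : (decide (lo ≤ k) && decide (k < hi) && (v != "")) = (v != "") := by
        simp [hrange.1, hrange.2]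
      rw [hg1, hg2, hgk, hcond]
      by_cases hv : v = ""
      · subst hv
        rw [if_neg (by simp)]
        simp only [bne_self_eq_false, Bool.false_eq_true, if_false]
        simpa using hih
      · rw [if_pos hv, if_pos (by simp [hv])]
        simp only [List.map_cons]
        exact List.perm_middle.trans (hih.cons v)
    · have hg : (PySem.List.pyRange lo hi 1).filterMap (pvStepA ((k, v) :: rest))
          = (PySem.List.pyRange lo hi 1).filterMap (pvStepA rest) :=
        List.filterMap_congr (fun f hf => hstep f (fun he => hk (he ▸ hf)))
      have hcond : (decide (lo ≤ k) && decide (k < hi) && (v != "")) = false := by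
        have h1 : ¬ (lo ≤ k ∧ k < hi) := fun hc => hk (PySem.List.mem_pyRange_one.mpr hc)
        rcases not_and_or.mp h1 with h2 | h2 <;> simp [h2]
      rw [hg, List.filter_cons, hcond]
      simpa using ih hnd

-- ===== VERDICT (by name: the statement is the Claim_ definition above) =====
theorem get_typical_activity_spec : Claim_equal_get_typical_activity := by
  intro activity central_frame frames_range _ hpre
  unfold Spec_get_typical_activity get_typical_activity get_typical_activity_alt
  simp only []
  rw [pv_foldl_shape, List.nil_append]
  have hperm := pv_perm_core activity (central_frame - frames_range) (central_frame + frames_range) hpre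
  set LA := (PySem.List.pyRange (central_frame - frames_range) (central_frame + frames_range) 1).filterMap (pvStepA activity) with hLA
  set LB := (activity.filter (fun fv => decide (central_frame - frames_range ≤ fv.1) && decide (fv.1 < central_frame + frames_range) && (fv.2 != ""))).map Prod.snd with hLB
  have hlen : LA.length = LB.length := hperm.length_eq
  have hsorted : PySem.List.sorted LA (fun x => x) false = PySem.List.sorted LB (fun x => x) false :=
    PySem.List.sorted_eq_sorted_of_perm LA LB (fun x => x) (fun _ _ h => h) hperm
  by_cases hA : LA.length > 0
  · have hB : LB ≠ [] := by
      intro hnil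
      rw [hnil, List.length_nil] at hlen
      omega
    rw [if_pos hA, if_pos hB, hsorted, hlen]
  · have hB : ¬ LB ≠ [] := by
      simp only [ne_eq, not_not]
      have : LA.length = 0 := by omega
      rw [hlen] at this; exact List.length_eq_zero_iff.mp this
    rw [if_neg hA, if_neg hB]
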